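-- pv_equiv track=rewrite | github.com/kingcu16/leet-code | 42.接雨水.py | calcJustOne
-- ===== SOURCE A (Python) =====
-- def calcJustOne(bh:list) -> int:
--     if len(bh) <= 2:
--         return 0
--
--     h1 = bh[0]
--     s = 0
--     for hh in bh[1:-1]:
--         s += h1 - hh
--     return s
-- ===== SOURCE B (Python) =====
-- def calcJustOne(bh: list) -> int:
--     if len(bh) <= 2:
--         return 0
--     # Identity: the middle differences telescope to first*(n-1) + last - total.
--
--     return bh[0] * (len(bh) - 1) + bh[-1] - sum(bh)
-- ===== Notes on version B (the rewrite author's own statement) =====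
-- stated objective: alternative
-- what changed: Instead of iterating the middle slice accumulating per-bar differences, B never forms the slice: it takes one library sum of the whole list and applies the closed-form identity first*(n-1) + last - total.
import Mathlib
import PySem

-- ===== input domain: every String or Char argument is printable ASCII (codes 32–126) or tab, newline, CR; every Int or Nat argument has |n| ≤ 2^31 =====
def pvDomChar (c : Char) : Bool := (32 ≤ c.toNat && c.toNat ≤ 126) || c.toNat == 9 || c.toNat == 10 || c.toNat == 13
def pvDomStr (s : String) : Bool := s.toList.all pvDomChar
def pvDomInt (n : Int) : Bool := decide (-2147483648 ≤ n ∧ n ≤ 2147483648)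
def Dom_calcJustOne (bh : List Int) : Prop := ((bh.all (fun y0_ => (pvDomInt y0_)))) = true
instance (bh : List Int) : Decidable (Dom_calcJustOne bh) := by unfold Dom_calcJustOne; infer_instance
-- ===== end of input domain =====

-- B avoids the middle slice: one whole-list sum plus a closed-form identity using the last element ('alternative', same cost).

-- ===== PORT A =====
-- A: guard, then loop s += h1 - hh over the middle slice bh[1:-1].
def calcJustOne (bh : List Int) : Int :=
  if bh.length ≤ 2 then 0
  else
    let h1 := bh.headI
    (PySem.List.slice bh (some 1) (some (-1))).foldl (fun s hh => s + (h1 - hh)) 0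

-- ===== PORT B =====
-- B: bh[0]*(len-1) + bh[-1] - sum(bh); bh[-1] via pyGet? (some, since length > 2).
def calcJustOne_alt (bh : List Int) : Int :=
  if bh.length ≤ 2 then 0
  else bh.headI * ((bh.length : Int) - 1) + (PySem.List.pyGet? bh (-1)).getD 0 - bh.sum

-- ===== PRECONDITION & SPEC =====
def Spec_calcJustOne (bh : List Int) (out : Int) : Prop := out = calcJustOne_alt bh
instance (bh : List Int) (out : Int) : Decidable (Spec_calcJustOne bh out) := by unfold Spec_calcJustOne; infer_instance

-- ===== CLAIM (what is proved, stated in full; the proofs are below) =====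
def Claim_equal_calcJustOne : Prop := ∀ (bh : List Int), Dom_calcJustOne bh → Spec_calcJustOne bh (calcJustOne bh)

-- ===== LEMMAS AND PROOFS =====
theorem foldl_sub_eq (h1 : Int) (l : List Int) (c : Int) :
    l.foldl (fun s hh => s + (h1 - hh)) c = c + h1 * l.length - l.sum := by
  induction l generalizing c with
  | nil => simp
  | cons x xs ih => simp [List.foldl, ih]; ring

theorem middle_eq (bh : List Int) (h : ¬ bh.length ≤ 2) :
    PySem.List.slice bh (some 1) (some (-1)) = bh.tail.dropLast := by
  unfold PySem.List.slice
  simp only [PySem.List.clampIdx_neg_one]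
  have h1 : PySem.List.clampIdx bh.length 1 = 1 := by
    simp [PySem.List.clampIdx]; omega
  rw [h1, List.dropLast_eq_take]
  simp [List.drop_one]

-- ===== VERDICT (by name: the statement is the Claim_ definition above) =====
theorem calcJustOne_spec : Claim_equal_calcJustOne := by
  intro bh _
  unfold Spec_calcJustOne calcJustOne calcJustOne_alt
  by_cases h : bh.length ≤ 2
  · simp [h]
  · simp only [h, if_false]
    rw [foldl_sub_eq, middle_eq bh h]
    match bh, h with
    | x :: xs, h =>
      have hxs : xs ≠ [] := by
        intro he; subst he; simp at h
      have hlast : (PySem.List.pyGet? (x :: xs) (-1)).getD 0 = xs.getLast hxs := by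
        rw [PySem.List.pyGet?_neg_one, List.getLast?_eq_some_getLast (by simp), Option.getD_some,
          List.getLast_cons hxs]
      have hsplit : xs = xs.dropLast ++ [xs.getLast hxs] := (List.dropLast_append_getLast hxs).symm
      have hsum : (x :: xs).sum = x + xs.dropLast.sum + xs.getLast hxs := by
        conv_lhs => rw [hsplit]
        simp [List.sum_cons, List.sum_append]
        ring
      have hlen : (xs.dropLast.length : Int) = ((x :: xs).length : Int) - 2 := by
        have h1 : 1 ≤ xs.length := List.length_pos_of_ne_nil hxs
        simp [List.length_dropLast, List.length_cons]
        omega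
      simp only [List.tail_cons, List.headI, hlast, hsum, hlen]
      ring
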